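-- pv_equiv track=rewrite | github.com/XiangwuGUO/Useit_MCP | mcp-client/utils/helpers.py | validate_vm_session_id
-- ===== SOURCE A (Python) =====
-- def validate_vm_session_id(vm_id: str, session_id: str) -> bool:
--     """验证VM ID和Session ID格式"""
--     if not vm_id or not session_id:
--         return False
--
--     # 基本格式验证
--     if len(vm_id) > 100 or len(session_id) > 100:
--         return False
--
--     # 不允许包含特殊字符
--     invalid_chars = ['/', '\\', ':', '*', '?', '"', '<', '>', '|']
--     for char in invalid_chars:
--         if char in vm_id or char in session_id:
--             return False
--
--     return True
-- ===== SOURCE B (Python) =====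
-- def _good(s: str) -> bool:
--     """One fused pass: non-empty, at most 100 chars, no forbidden char."""
--     n = 0
--     for ch in s:
--         n += 1
--         if n > 100:
--             return False
--         if ch in '/\\:*?"<>|':
--             return False
--     return n > 0
--
--
-- def validate_vm_session_id(vm_id: str, session_id: str) -> bool:
--     """验证VM ID和Session ID格式"""
--     return _good(vm_id) and _good(session_id)
-- ===== Notes on version B (the rewrite author's own statement) =====
-- stated objective: alternative
-- what changed: Replaces A's staged whole-string checks (emptiness, length, then a nine-iteration loop of substring scans over both strings) with a per-string fused single pass carrying a character counter that validates emptiness, the 100-char cap (with early exit) and character legality in one traversal.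
import Mathlib
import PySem

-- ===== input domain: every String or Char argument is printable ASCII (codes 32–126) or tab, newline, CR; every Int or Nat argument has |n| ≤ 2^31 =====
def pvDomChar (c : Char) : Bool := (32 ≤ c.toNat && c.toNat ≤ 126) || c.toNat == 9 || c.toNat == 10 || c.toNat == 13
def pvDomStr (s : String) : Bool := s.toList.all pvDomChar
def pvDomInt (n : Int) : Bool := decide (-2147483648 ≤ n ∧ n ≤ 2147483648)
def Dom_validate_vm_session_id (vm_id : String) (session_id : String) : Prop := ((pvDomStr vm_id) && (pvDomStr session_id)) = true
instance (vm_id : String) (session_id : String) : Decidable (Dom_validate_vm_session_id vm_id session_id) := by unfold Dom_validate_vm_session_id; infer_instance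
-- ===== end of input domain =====

-- B replaces A's staged checks (emptiness, length, nine substring scans) with one
-- fused counting pass per string (alternative decomposition; same results).


-- ===== PORT A =====
-- the literal list invalid_chars of A
def invalidCharsA : List Char := ['/', '\\', ':', '*', '?', '"', '<', '>', '|']

-- A's loop: for char in invalid_chars: if char in vm_id or char in session_id: return False
-- ('char in s' for a single character is exactly character membership in s.toList)
def aLoop (vm ss : List Char) : List Char → Bool
  | [] => true
  | c :: rest => if vm.contains c || ss.contains c then false else aLoop vm ss rest

def validate_vm_session_id (vm_id : String) (session_id : String) : Bool :=
  if vm_id.toList.isEmpty || session_id.toList.isEmpty then false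
  else if vm_id.toList.length > 100 || session_id.toList.length > 100 then false
  else aLoop vm_id.toList session_id.toList invalidCharsA

-- ===== PORT B =====
-- the forbidden-character literal of Source B's `ch in '/\\:*?"<>|'` test
def invalidB : List Char := "/\\:*?\"<>|".toList

-- _good(s): one pass with a counter n; early exit past 100 or on a forbidden char
def goodB : List Char → Nat → Bool
  | [], n => decide (n > 0)
  | c :: rest, n =>
      if n + 1 > 100 then false
      else if invalidB.contains c then false
      else goodB rest (n + 1)

def validate_vm_session_id_alt (vm_id : String) (session_id : String) : Bool :=
  goodB vm_id.toList 0 && goodB session_id.toList 0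

-- ===== PRECONDITION & SPEC =====
def Spec_validate_vm_session_id (vm_id : String) (session_id : String) (out : Bool) : Prop := out = validate_vm_session_id_alt vm_id session_id
instance (vm_id : String) (session_id : String) (out : Bool) : Decidable (Spec_validate_vm_session_id vm_id session_id out) := by unfold Spec_validate_vm_session_id; infer_instance

-- ===== CLAIM (what is proved, stated in full; the proofs are below) =====
def Claim_equal_validate_vm_session_id : Prop := ∀ (vm_id : String) (session_id : String), Dom_validate_vm_session_id vm_id session_id → Spec_validate_vm_session_id vm_id session_id (validate_vm_session_id vm_id session_id)

-- ===== LEMMAS AND PROOFS =====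

-- B's fused pass decides "non-empty ∧ length ≤ 100 ∧ no forbidden char"
theorem goodB_spec (l : List Char) (n : Nat) (hn : n ≤ 100) :
    goodB l n = (decide (0 < n + l.length) && decide (n + l.length ≤ 100)
                  && l.all (fun c => !(invalidB.contains c))) := by
  induction l generalizing n with
  | nil => simp [goodB, hn]
  | cons c rest ih =>
      simp only [goodB, List.all_cons, List.length_cons]
      by_cases h1 : n + 1 > 100
      · have h2 : ¬ (n + (rest.length + 1) ≤ 100) := by omega
        simp [h1, h2]
      · rw [if_neg h1, ih (n + 1) (by omega)]
        have harith : n + 1 + rest.length = n + (rest.length + 1) := by omega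
        cases hc : invalidB.contains c
        · rw [harith]
          simp only [Bool.not_false, Bool.true_and, Bool.false_eq_true, if_false]
          rfl
        · simp

-- A's loop decides "no element of L occurs in vm or ss"
theorem aLoop_eq_all (vm ss : List Char) (L : List Char) :
    aLoop vm ss L = L.all (fun c => !(vm.contains c || ss.contains c)) := by
  induction L with
  | nil => rfl
  | cons c rest ih =>
      simp only [aLoop, List.all_cons, ih]
      cases vm.contains c || ss.contains c <;> simp

-- scanning the needle list against a string equals scanning the string against the list
theorem swap_scan (xs L : List Char) :
    (L.all fun c => !(xs.contains c)) = (xs.all fun c => !(L.contains c)) := by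
  rw [Bool.eq_iff_iff]
  simp only [List.all_eq_true, Bool.not_eq_eq_eq_not, Bool.not_true, List.contains_eq_mem,
    decide_eq_false_iff_not]
  constructor
  · intro h c hc hmem; exact h c hmem hc
  · intro h c hc hmem; exact h c hmem hc

theorem listB_eq_listA : invalidB = invalidCharsA := by decide

theorem all_not_or (vm ss : List Char) (L : List Char) :
    (L.all fun c => !(vm.contains c || ss.contains c))
      = ((L.all fun c => !(vm.contains c)) && (L.all fun c => !(ss.contains c))) := by
  induction L with
  | nil => rfl
  | cons c rest ih =>
      simp only [List.all_cons, ih]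
      cases vm.contains c <;> cases ss.contains c <;>
        cases rest.all (fun c => !(vm.contains c)) <;>
        cases rest.all (fun c => !(ss.contains c)) <;> rfl

-- ===== VERDICT (by name: the statement is the Claim_ definition above) =====
theorem validate_vm_session_id_spec : Claim_equal_validate_vm_session_id := by
  intro vm_id session_id _
  unfold Spec_validate_vm_session_id validate_vm_session_id validate_vm_session_id_alt
  rw [goodB_spec _ _ (by omega), goodB_spec _ _ (by omega), aLoop_eq_all, all_not_or,
      swap_scan _ invalidCharsA, swap_scan _ invalidCharsA, ← listB_eq_listA]
  set vm := vm_id.toList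
  set ss := session_id.toList
  by_cases h1 : vm.isEmpty
  · rw [List.isEmpty_iff] at h1
    simp [h1]
  · have hv : 0 < vm.length :=
      List.length_pos_of_ne_nil (by simpa [List.isEmpty_iff] using h1)
    by_cases h2 : ss.isEmpty
    · rw [List.isEmpty_iff] at h2
      simp [h2]
    · have hs : 0 < ss.length :=
        List.length_pos_of_ne_nil (by simpa [List.isEmpty_iff] using h2)
      by_cases h3 : vm.length > 100
      · simp [h1, h2, h3, show ¬ vm.length ≤ 100 by omega]
      · by_cases h4 : ss.length > 100
        · simp [h1, h2, h3, h4, show ¬ ss.length ≤ 100 by omega]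
        · simp [h1, h2, h3, h4, hv, hs, show vm.length ≤ 100 by omega,
            show ss.length ≤ 100 by omega]
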